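-- pv_equiv track=rewrite | github.com/arsenitheunicorn/prog | hw07/averin2var.py | woerterbuch
-- ===== SOURCE A (Python) =====
-- def woerterbuch(a):
--     d = {}
--     for word in a:
--         if word[len(word)-4: len(word):] == 'ness':
--             if word in d:
--                 d[word] += 1
--             else:
--                 d[word] = 1
--     return d
-- ===== SOURCE B (Python) =====
-- def woerterbuch(a):
--     # Repeated partition-by-first-word: take the first qualifying word, derive its
--     # count from the length drop when all its copies are purged, recurse on the rest.
--     ws = [w for w in a if w.endswith('ness')]
--     d = {}
--     while ws:
--         w = ws[0]
--         rest = [x for x in ws if x != w]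
--         d[w] = len(ws) - len(rest)
--         ws = rest
--     return d
-- ===== Notes on version B (the rewrite author's own statement) =====
-- stated objective: alternative
-- what changed: Replaces A's single-pass incremental dict accumulation (per-word membership test and += / =1) with repeated partition-by-first-word: filter the 'ness' words, then repeatedly take the first remaining word, purge all its copies, and record its count as the length drop, so no per-element increment or dict lookup occurs.
import Mathlib
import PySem

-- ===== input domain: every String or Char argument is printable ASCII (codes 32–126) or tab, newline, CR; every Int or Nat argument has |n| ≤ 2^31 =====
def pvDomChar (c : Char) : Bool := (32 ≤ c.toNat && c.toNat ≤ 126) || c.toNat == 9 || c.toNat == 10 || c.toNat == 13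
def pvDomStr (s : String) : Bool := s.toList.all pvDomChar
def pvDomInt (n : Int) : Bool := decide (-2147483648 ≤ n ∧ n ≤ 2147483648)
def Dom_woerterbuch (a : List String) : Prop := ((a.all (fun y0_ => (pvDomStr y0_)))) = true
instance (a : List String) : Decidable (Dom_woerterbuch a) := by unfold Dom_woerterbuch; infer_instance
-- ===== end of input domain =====

-- B: instead of A's one-pass hash accumulation, repeatedly take the first qualifying word, purge all its copies and read its count off the length drop (alternative algorithm, same return value).


-- ===== PORT A =====
def woerterbuch (a : List String) : List (String × Int) :=
  (a.foldl (fun d word =>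
    if PySem.Str.slice word (some (PySem.Str.len word - 4)) (some (PySem.Str.len word)) == "ness" then
      if d.contains word then
        d.insert word (d.getD word 0 + 1)
      else
        d.insert word 1
    else d) PySem.Dict.empty).items

-- ===== PORT B =====
-- while ws: w = ws[0]; rest = [x for x in ws if x != w]; d[w] = len(ws) - len(rest); ws = rest
def wbLoop : List String → PySem.Dict String Int → PySem.Dict String Int
  | [], d => d
  | w :: t, d =>
    let rest := (w :: t).filter (fun x => x != w)
    wbLoop rest (d.insert w (((w :: t).length : Int) - rest.length))
termination_by ws _ => ws.length
decreasing_by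
  simp only [List.filter_cons, bne_self_eq_false, List.length_cons]
  exact Nat.lt_succ_of_le (List.length_filter_le _ _)

def woerterbuch_alt (a : List String) : List (String × Int) :=
  (wbLoop (a.filter (fun w => PySem.Str.endswith w "ness")) PySem.Dict.empty).items

-- ===== PRECONDITION & SPEC =====
def Spec_woerterbuch (a : List String) (out : List (String × Int)) : Prop := out = woerterbuch_alt a
instance (a : List String) (out : List (String × Int)) : Decidable (Spec_woerterbuch a out) := by unfold Spec_woerterbuch; infer_instance

-- ===== CLAIM (what is proved, stated in full; the proofs are below) =====
def Claim_equal_woerterbuch : Prop := ∀ (a : List String), Dom_woerterbuch a → Spec_woerterbuch a (woerterbuch a)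

-- ===== LEMMAS AND PROOFS =====

-- The slice test word[len-4:len:] == 'ness' is exactly endswith('ness').
lemma cond_eq (w : String) :
    (PySem.Str.slice w (some (PySem.Str.len w - 4)) (some (PySem.Str.len w)) == "ness")
      = PySem.Str.endswith w "ness" := by
  rw [Bool.eq_iff_iff, beq_iff_eq]
  have hlist : PySem.Str.slice w (some (PySem.Str.len w - 4)) (some (PySem.Str.len w)) = "ness"
      ↔ PySem.Chars.slice w.toList (some (PySem.Str.len w - 4)) (some (PySem.Str.len w)) = "ness".toList := by
    constructor
    · intro h; rw [← PySem.Str.toList_slice, h]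
    · intro h
      have := congrArg String.ofList h
      rwa [← PySem.Str.toList_slice, String.ofList_toList, String.ofList_toList] at this
  rw [hlist]
  unfold PySem.Str.endswith
  rw [PySem.Chars.endswith_iff]
  simp only [PySem.Chars.slice_eq_listSlice, PySem.Str.len]
  set l := w.toList with hl
  set n := l.length with hn
  rcases le_or_gt 4 n with h4 | h4
  · have hc : ((n : Int) - 4) = ((n - 4 : Nat) : Int) := by omega
    rw [hc, PySem.List.slice_natCast]
    have ht : n - (n - 4) = 4 := by omega
    rw [ht]
    have hdl : (l.drop (n - 4)).length = 4 := by
      rw [List.length_drop]; omega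
    rw [List.take_of_length_le (by rw [hdl])]
    rw [List.suffix_iff_eq_drop]
    have : l.length - ("ness".toList).length = n - 4 := by
      simp [← hn]
    rw [this]
    exact eq_comm
  · constructor
    · intro h
      have := congrArg List.length h
      rw [PySem.List.length_slice] at this
      have h1 := PySem.List.clampIdx_le n ((n : Int))
      have : PySem.List.clampIdx n ((n:Int)) - PySem.List.clampIdx n ((n:Int) - 4) < 4 := by omega
      simp_all
    · intro h
      have hle := h.length_le
      have h4' : ("ness".toList).length = 4 := by decide
      rw [h4'] at hle
      simp only [← hn] at hle
      omega

-- A's loop body: the contains-branching is one insert of getD + 1.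
lemma body_eq :
    (fun (d : PySem.Dict String Int) (word : String) =>
        if d.contains word then d.insert word (d.getD word 0 + 1) else d.insert word 1)
      = fun d word => d.insert word (d.getD word 0 + 1) := by
  funext d word
  by_cases h : d.contains word
  · simp [h]
  · simp only [Bool.not_eq_true] at h
    simp [h, PySem.Dict.getD_of_not_contains d (0 : Int) h]

-- set(...) of a filtered list is the filtered set.
lemma ofList_filter {α : Type} [BEq α] [LawfulBEq α] (p : α → Bool) (xs : List α) :
    PySem.Set.ofList (xs.filter p) = (PySem.Set.ofList xs).filter p := by
  induction xs with
  | nil => rfl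
  | cons x xs ih =>
    rw [PySem.Set.ofList_cons, List.filter_cons]
    by_cases hp : p x = true
    · rw [hp]
      simp only [if_true, PySem.Set.ofList_cons, ih, PySem.Set.discard, List.filter_cons, hp,
        List.filter_filter]
      congr 1
      exact List.filter_congr (fun y _ => by rw [Bool.and_comm])
    · simp only [hp, if_false, List.filter_cons, Bool.false_eq_true, ih, PySem.Set.discard,
        List.filter_filter]
      refine List.filter_congr (fun y _ => ?_)
      by_cases hy : p y = true
      · have : (y == x) = false := by
          by_contra hne
          simp only [Bool.not_eq_false, beq_iff_eq] at hne
          subst hne; exact hp hy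
        simp [hy, this]
      · simp only [Bool.not_eq_true] at hy
        simp [hy]

-- the length drop when purging w is w's count.
lemma filter_ne_length_add_count (w : String) (ws : List String) :
    (ws.filter (fun x => x != w)).length + ws.count w = ws.length := by
  induction ws with
  | nil => rfl
  | cons x t ih =>
    rw [List.filter_cons, List.count_cons]
    by_cases hx : x = w
    · subst hx; simp only [bne_self_eq_false, Bool.false_eq_true, if_false, beq_self_eq_true,
        if_true, List.length_cons]
      omega
    · have hb : (x != w) = true := by simp [hx]
      have hb2 : (w == x) = false := by simp [Ne.symm hx]
      simp only [hb, if_true, List.length_cons, hb2, beq_iff_eq, hx, if_false]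
      omega

lemma count_eq_length_sub (w : String) (ws : List String) :
    ((ws.length : Int) - (ws.filter (fun x => x != w)).length) = (ws.count w : Int) := by
  have h := filter_ne_length_add_count w ws
  omega

-- B's loop is a foldl over the distinct words inserting their counts.
lemma wbLoop_eq (ws : List String) (d : PySem.Dict String Int) :
    wbLoop ws d
      = (PySem.Set.ofList ws).foldl (fun d k => d.insert k ((ws.count k : Int))) d := by
  fun_induction wbLoop ws d with
  | case1 d => rfl
  | case2 w t d rest ih =>
    rw [ih, PySem.Set.ofList_cons, List.foldl_cons]
    have hrest : rest = (w :: t).filter (fun x => x != w) := rfl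
    have hset : PySem.Set.ofList rest = (PySem.Set.ofList (w :: t)).discard w := by
      rw [hrest, ofList_filter]
      rfl
    rw [hset, PySem.Set.ofList_cons]
    have hdisc : PySem.Set.discard (w :: PySem.Set.discard (PySem.Set.ofList t) w) w
        = PySem.Set.discard (PySem.Set.ofList t) w := by
      simp [PySem.Set.discard, List.filter_cons, List.filter_filter, Bool.and_self]
    rw [hdisc, count_eq_length_sub]
    refine PySem.List.foldl_congr_mem _ _ _ _ (fun acc k hk => ?_)
    have hk' : k ∈ (PySem.Set.ofList t) ∧ k ≠ w := (PySem.Set.mem_discard _ _ _).mp hk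
    have hcnt : rest.count k = (w :: t).count k := by
      rw [hrest, List.count_filter (by simp [hk'.2])]
    rw [hcnt]

-- ===== VERDICT (by name: the statement is the Claim_ definition above) =====
theorem woerterbuch_spec : Claim_equal_woerterbuch := by
  intro a _
  unfold Spec_woerterbuch woerterbuch woerterbuch_alt
  simp only [cond_eq]
  rw [← List.foldl_filter, body_eq,
      PySem.Dict.foldl_insert_getD_add_one_eq_counter, PySem.Dict.items_counter]
  set ws := a.filter (fun w => PySem.Str.endswith w "ness") with hws
  rw [wbLoop_eq]
  rw [PySem.Dict.items_foldl_insert_fresh (PySem.Set.ofList ws) (fun k => k)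
        (fun k => ((ws.count k : Nat) : Int)) PySem.Dict.empty
        (fun _ _ => PySem.Dict.contains_empty _)
        (by simp [PySem.Set.nodup_ofList ws])]
  simp [PySem.Dict.empty]
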